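-- pv_equiv track=rewrite | github.com/qiqiandfei/JavSpider | JavSpider/spiders/jav.py | getsubtitle
-- ===== SOURCE A (Python) =====
-- def getsubtitle(subtitlelist):
--     index = -1
--     #先找高清 + 字幕
--     for i in range(0, len(subtitlelist)):
--         if 'HD Videos">HD</a>' in subtitlelist[i] and 'Subtitles">SUB</a>' in subtitlelist[i]:
--             index = i
--             return index
--
--     #找不到高清 + 字幕找字幕
--     if index == -1:
--         for i in range(0, len(subtitlelist)):
--             if 'Subtitles">SUB</a>' in subtitlelist[i]:
--                 index = i
--                 return index
--     return index
-- ===== SOURCE B (Python) =====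
-- def getsubtitle(subtitlelist):
--     sub_index = -1
--     for i, s in enumerate(subtitlelist):
--         if 'HD Videos">HD</a>' in s and 'Subtitles">SUB</a>' in s:
--             return i
--         if 'Subtitles">SUB</a>' in s and sub_index == -1:
--             sub_index = i
--     return sub_index
-- ===== Notes on version B (the rewrite author's own statement) =====
-- stated objective: simpler
-- what changed: Replaces A's two sequential index loops (HD+SUB scan, then SUB rescan) by one enumerate pass that returns immediately on HD+SUB and records the first SUB-only index.
import Mathlib
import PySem

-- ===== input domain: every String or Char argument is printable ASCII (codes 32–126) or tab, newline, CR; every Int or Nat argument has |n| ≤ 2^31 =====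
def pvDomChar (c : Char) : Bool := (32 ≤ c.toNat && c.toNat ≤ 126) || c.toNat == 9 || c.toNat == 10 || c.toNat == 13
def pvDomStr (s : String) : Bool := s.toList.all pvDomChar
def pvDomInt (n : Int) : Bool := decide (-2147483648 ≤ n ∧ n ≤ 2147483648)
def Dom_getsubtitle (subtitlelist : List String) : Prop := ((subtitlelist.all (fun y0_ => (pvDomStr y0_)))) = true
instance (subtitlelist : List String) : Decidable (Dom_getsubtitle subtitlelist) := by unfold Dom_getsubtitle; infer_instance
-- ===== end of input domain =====

-- ===== PORT A =====
-- B replaces A's two sequential index loops by one pass recording the first SUB-only index (simpler).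
-- A: first loop over range(len) returning first index containing both markers;
-- second loop returning first index containing the SUB marker; else -1.
def pvHD : String := "HD Videos\">HD</a>"
def pvSUB : String := "Subtitles\">SUB</a>"

-- first loop of A: index of first element containing both markers
def getsubLoop1 : List String → Int → Option Int
  | [], _ => none
  | s :: rest, i =>
    if PySem.Str.isIn pvHD s = true ∧ PySem.Str.isIn pvSUB s = true then some i
    else getsubLoop1 rest (i + 1)

-- second loop of A: index of first element containing the SUB marker
def getsubLoop2 : List String → Int → Option Int
  | [], _ => none
  | s :: rest, i =>
    if PySem.Str.isIn pvSUB s = true then some i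
    else getsubLoop2 rest (i + 1)

def getsubtitle (subtitlelist : List String) : Int :=
  match getsubLoop1 subtitlelist 0 with
  | some i => i
  | none =>
    match getsubLoop2 subtitlelist 0 with
    | some i => i
    | none => -1

-- ===== PORT B =====
-- single pass: return immediately on HD+SUB, remember first SUB-only index in subIdx
def getsubLoopB : List String → Int → Int → Int
  | [], _, subIdx => subIdx
  | s :: rest, i, subIdx =>
    if PySem.Str.isIn pvHD s = true ∧ PySem.Str.isIn pvSUB s = true then i
    else if PySem.Str.isIn pvSUB s = true ∧ subIdx = -1 then getsubLoopB rest (i + 1) i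
    else getsubLoopB rest (i + 1) subIdx

def getsubtitle_alt (subtitlelist : List String) : Int :=
  getsubLoopB subtitlelist 0 (-1)

-- ===== PRECONDITION & SPEC =====
def Spec_getsubtitle (subtitlelist : List String) (out : Int) : Prop := out = getsubtitle_alt subtitlelist
instance (subtitlelist : List String) (out : Int) : Decidable (Spec_getsubtitle subtitlelist out) := by unfold Spec_getsubtitle; infer_instance

-- ===== CLAIM (what is proved, stated in full; the proofs are below) =====
def Claim_equal_getsubtitle : Prop := ∀ (subtitlelist : List String), Dom_getsubtitle subtitlelist → Spec_getsubtitle subtitlelist (getsubtitle subtitlelist)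

-- ===== LEMMAS AND PROOFS =====

theorem getsubLoopB_some (l : List String) : ∀ (i j s0 : Int),
    getsubLoop1 l i = some j → getsubLoopB l i s0 = j := by
  induction l with
  | nil => intro i j s0 h; simp [getsubLoop1] at h
  | cons s rest ih =>
    intro i j s0 h
    simp only [getsubLoop1, getsubLoopB] at *
    split at h
    · simp_all
    · rename_i hns
      simp only [if_neg hns]
      split
      · exact ih _ _ _ h
      · exact ih _ _ _ h

theorem getsubLoopB_keep (l : List String) : ∀ (i s0 : Int), s0 ≠ -1 →
    getsubLoop1 l i = none → getsubLoopB l i s0 = s0 := by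
  induction l with
  | nil => intro i s0 _ _; rfl
  | cons s rest ih =>
    intro i s0 hs0 h
    simp only [getsubLoop1] at h
    split at h
    · simp at h
    · rename_i hns
      simp only [getsubLoopB, if_neg hns]
      split
      · rename_i hc; exact absurd hc.2 hs0
      · exact ih _ _ hs0 h

theorem getsubLoopB_none (l : List String) : ∀ (i : Int), 0 ≤ i →
    getsubLoop1 l i = none →
    getsubLoopB l i (-1) = (match getsubLoop2 l i with | some j => j | none => -1) := by
  induction l with
  | nil => intro i _ _; rfl
  | cons s rest ih =>
    intro i hi h
    simp only [getsubLoop1] at h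
    split at h
    · simp at h
    · rename_i hns
      simp only [getsubLoopB, getsubLoop2, if_neg hns]
      by_cases hsub : PySem.Str.isIn pvSUB s = true
      · simp only [and_true, if_pos hsub]
        exact getsubLoopB_keep rest (i + 1) i (by omega) h
      · simp only [and_true, if_neg hsub]
        exact ih (i + 1) (by omega) h

-- ===== VERDICT (by name: the statement is the Claim_ definition above) =====
theorem getsubtitle_spec : Claim_equal_getsubtitle := by
  intro l _
  unfold Spec_getsubtitle getsubtitle getsubtitle_alt
  cases h : getsubLoop1 l 0 with
  | some j => exact (getsubLoopB_some l 0 j (-1) h).symm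
  | none => exact (getsubLoopB_none l 0 (by norm_num) h).symm
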